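-- pv_equiv track=rewrite | github.com/hiroto0227/crf-chemdner | scripts/transformer.py | convertTextToFeatures
-- ===== SOURCE A (Python) =====
-- def getNgram(array, n_range=(-2, 2), mode='letter'):
--     """n_range[0]からn_range[1]までのiの周辺語を繋げて返す。
--     >>> getNgram(['I', ' ', 'a', 'm', ' ', 'a', ' ', 'm', 'a', 'n', '.'], (-2, 2))
--     >>> ['<B><B>I a', '<B>I am', 'I am ', ' am a', 'am a ' ...]
--     """
--     assert n_range[0] <= n_range[1], 'invalid n_range. (n_range[0] <= n_range[1])'
--     ret_array = []
--     pagging_array = ['<B>'] * max(0, -1 * n_range[0]) + array + ['<E>'] * max(n_range[1], 0)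
--     for i in range(len(array)):
--         if n_range[0] > 0:
--             start_ix = i + n_range[0]
--         else:
--             start_ix = i
--         end_ix = start_ix + (n_range[1] - n_range[0]) + 1
--         if mode == 'letter':
--             ret_array.append(''.join(pagging_array[start_ix: end_ix]))
--         elif mode == 'word':
--             ret_array.append(' '.join(pagging_array[start_ix: end_ix]))
--     return ret_array
--
-- def convertTextToFeatures(text):
--     """textをn-gramの辞書にして返す。
--     """
--     array = [c for c in text]
--     g_1_1 = getNgram(array, (-4, -4), mode='letter')
--     g_1_2 = getNgram(array, (-3, -3), mode='letter')
--     g_1_3 = getNgram(array, (-2, -2), mode='letter')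
--     g_1_4 = getNgram(array, (-1, -1), mode='letter')
--     g_1_5 = getNgram(array, (0, 0), mode='letter')
--     g_1_6 = getNgram(array, (1, 1), mode='letter')
--     g_1_7 = getNgram(array, (2, 2), mode='letter')
--     g_1_8 = getNgram(array, (3, 3), mode='letter')
--     g_1_9 = getNgram(array, (4, 4), mode='letter')
--     g_2_1 = getNgram(array, (-1, 0), mode='letter')
--     g_2_2 = getNgram(array, (0, 1), mode='letter')
--     g_3_1 = getNgram(array, (-2, 0), mode='letter')
--     g_3_2 = getNgram(array, (-1, 1), mode='letter')
--     g_3_3 = getNgram(array, (0, 2), mode='letter')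
--     g_4_1 = getNgram(array, (-3, 0), mode='letter')
--     g_4_2 = getNgram(array, (-2, 1), mode='letter')
--     g_4_3 = getNgram(array, (-1, 2), mode='letter')
--     g_4_4 = getNgram(array, (0, 3), mode='letter')
--     g_5_1 = getNgram(array, (-4, 0), mode='letter')
--     g_5_2 = getNgram(array, (-3, 1), mode='letter')
--     g_5_3 = getNgram(array, (-2, 2), mode='letter')
--     g_5_4 = getNgram(array, (-1, 3), mode='letter')
--     g_5_5 = getNgram(array, (0, 4), mode='letter')
--     return [{'a': _1_1, 'a_2': _1_2, 'a_3': _1_3, 'a_4': _1_4, 'a_5': _1_5, 'a_6': _1_6, 'a_7': _1_7, 'a_8': _1_8, 'a_9': _1_9, 'b': _2_1, 'c': _2_2, 'd': _3_1, 'e': _3_2, 'f': _3_3, 'g': _4_1, 'h': _4_2, 'i': _4_3, 'j': _4_4, 'k': _5_1, 'l': _5_2, 'm': _5_3, 'n': _5_4, 'o': _5_5} for _1_1, _1_2, _1_3, _1_4, _1_5, _1_6, _1_7, _1_8, _1_9, _2_1, _2_2, _3_1, _3_2, _3_3, _4_1, _4_2, _4_3, _4_4, _5_1, _5_2, _5_3,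 _5_4, _5_5 in zip(g_1_1, g_1_2, g_1_3, g_1_4, g_1_5, g_1_6, g_1_7, g_1_8, g_1_9, g_2_1, g_2_2, g_3_1, g_3_2, g_3_3, g_4_1, g_4_2, g_4_3, g_4_4, g_5_1, g_5_2, g_5_3, g_5_4, g_5_5)]
-- ===== SOURCE B (Python) =====
-- WINDOWS = [('a', -4, -4), ('a_2', -3, -3), ('a_3', -2, -2), ('a_4', -1, -1),
--            ('a_5', 0, 0), ('a_6', 1, 1), ('a_7', 2, 2), ('a_8', 3, 3), ('a_9', 4, 4),
--            ('b', -1, 0), ('c', 0, 1),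
--            ('d', -2, 0), ('e', -1, 1), ('f', 0, 2),
--            ('g', -3, 0), ('h', -2, 1), ('i', -1, 2), ('j', 0, 3),
--            ('k', -4, 0), ('l', -3, 1), ('m', -2, 2), ('n', -1, 3), ('o', 0, 4)]
--
-- def convertTextToFeatures(text):
--     padded = ['<B>'] * 4 + list(text) + ['<E>'] * 4
--     rows = []
--     for i in range(len(text)):
--         rows.append({key: ''.join(padded[i + 4 + a: i + 4 + b + 1]) for key, a, b in WINDOWS})
--     return rows
-- ===== Notes on version B (the rewrite author's own statement) =====
-- stated objective: simpler
-- what changed: A builds 23 full feature columns with separate getNgram passes (each re-padding the text) and zips them into dicts; B pads once with 4 sentinels on each side and builds each position's dict directly from a 23-entry window-offset table in a single pass.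
import Mathlib
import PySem

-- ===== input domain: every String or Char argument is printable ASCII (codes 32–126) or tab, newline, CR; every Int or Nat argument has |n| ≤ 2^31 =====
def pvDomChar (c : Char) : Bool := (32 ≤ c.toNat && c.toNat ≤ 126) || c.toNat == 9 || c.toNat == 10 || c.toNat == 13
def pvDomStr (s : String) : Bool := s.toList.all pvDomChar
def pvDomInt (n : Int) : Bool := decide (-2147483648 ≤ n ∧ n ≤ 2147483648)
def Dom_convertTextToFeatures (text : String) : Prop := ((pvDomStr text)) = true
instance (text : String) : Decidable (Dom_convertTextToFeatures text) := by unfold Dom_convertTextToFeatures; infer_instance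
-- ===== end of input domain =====

-- B replaces A's 23 column-building getNgram passes plus a 23-way zip by a single pass that pads
-- once and builds each position's feature row directly from a window table (objective: simpler).

-- ===== PORT A =====
-- getNgram: the assert never fails on the calls convertTextToFeatures makes (all 23 windows have
-- a ≤ b), so it is not modelled; slices are PySem.List.slice, exact here (bounds are nonnegative).
def getNgram (array : List String) (nRange : Int × Int) (mode : String) : List String :=
  let pagging := List.replicate (max 0 (-1 * nRange.1)).toNat "<B>" ++ array
      ++ List.replicate (max nRange.2 0).toNat "<E>"
  (PySem.List.pyRange 0 (array.length : Int) 1).foldl (fun ret i =>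
    let start_ix : Int := if nRange.1 > 0 then i + nRange.1 else i
    let end_ix : Int := start_ix + (nRange.2 - nRange.1) + 1
    if mode == "letter" then
      ret ++ [PySem.Str.join "" (PySem.List.slice pagging (some start_ix) (some end_ix))]
    else if mode == "word" then
      ret ++ [PySem.Str.join " " (PySem.List.slice pagging (some start_ix) (some end_ix))]
    else ret) []

-- the 23-way zip + dict comprehension of A's return statement
def pvZip23 (l1 l2 l3 l4 l5 l6 l7 l8 l9 l10 l11 l12 l13 l14 l15 l16 l17 l18 l19 l20 l21 l22 l23 : List String) : List (List (String × String)) :=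
  match l1, l2, l3, l4, l5, l6, l7, l8, l9, l10, l11, l12, l13, l14, l15, l16, l17, l18, l19, l20, l21, l22, l23 with
  | x1 :: t1, x2 :: t2, x3 :: t3, x4 :: t4, x5 :: t5, x6 :: t6, x7 :: t7, x8 :: t8, x9 :: t9, x10 :: t10, x11 :: t11, x12 :: t12, x13 :: t13, x14 :: t14, x15 :: t15, x16 :: t16, x17 :: t17, x18 :: t18, x19 :: t19, x20 :: t20, x21 :: t21, x22 :: t22, x23 :: t23 =>
      [("a", x1), ("a_2", x2), ("a_3", x3), ("a_4", x4), ("a_5", x5), ("a_6", x6), ("a_7", x7), ("a_8", x8), ("a_9", x9), ("b", x10), ("c", x11), ("d", x12), ("e", x13), ("f", x14), ("g", x15), ("h", x16), ("i", x17), ("j", x18), ("k", x19), ("l", x20), ("m", x21), ("n", x22), ("o", x23)] :: pvZip23 t1 t2 t3 t4 t5 t6 t7 t8 t9 t10 t11 t12 t13 t14 t15 t16 t17 t18 t19 t20 t21 t22 t23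
  | _, _, _, _, _, _, _, _, _, _, _, _, _, _, _, _, _, _, _, _, _, _, _ => []

def convertTextToFeatures (text : String) : List (List (String × String)) :=
  let array := text.toList.map (fun c => String.ofList [c])
  let g1 := getNgram array (-4, -4) "letter"
  let g2 := getNgram array (-3, -3) "letter"
  let g3 := getNgram array (-2, -2) "letter"
  let g4 := getNgram array (-1, -1) "letter"
  let g5 := getNgram array (0, 0) "letter"
  let g6 := getNgram array (1, 1) "letter"
  let g7 := getNgram array (2, 2) "letter"
  let g8 := getNgram array (3, 3) "letter"
  let g9 := getNgram array (4, 4) "letter"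
  let g10 := getNgram array (-1, 0) "letter"
  let g11 := getNgram array (0, 1) "letter"
  let g12 := getNgram array (-2, 0) "letter"
  let g13 := getNgram array (-1, 1) "letter"
  let g14 := getNgram array (0, 2) "letter"
  let g15 := getNgram array (-3, 0) "letter"
  let g16 := getNgram array (-2, 1) "letter"
  let g17 := getNgram array (-1, 2) "letter"
  let g18 := getNgram array (0, 3) "letter"
  let g19 := getNgram array (-4, 0) "letter"
  let g20 := getNgram array (-3, 1) "letter"
  let g21 := getNgram array (-2, 2) "letter"
  let g22 := getNgram array (-1, 3) "letter"
  let g23 := getNgram array (0, 4) "letter"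
  pvZip23 g1 g2 g3 g4 g5 g6 g7 g8 g9 g10 g11 g12 g13 g14 g15 g16 g17 g18 g19 g20 g21 g22 g23

-- ===== PORT B =====
-- B's WINDOWS table: (dict key, window start offset a, window end offset b)
def pvWindows : List (String × Int × Int) :=
  [("a", -4, -4),
   ("a_2", -3, -3),
   ("a_3", -2, -2),
   ("a_4", -1, -1),
   ("a_5", 0, 0),
   ("a_6", 1, 1),
   ("a_7", 2, 2),
   ("a_8", 3, 3),
   ("a_9", 4, 4),
   ("b", -1, 0),
   ("c", 0, 1),
   ("d", -2, 0),
   ("e", -1, 1),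
   ("f", 0, 2),
   ("g", -3, 0),
   ("h", -2, 1),
   ("i", -1, 2),
   ("j", 0, 3),
   ("k", -4, 0),
   ("l", -3, 1),
   ("m", -2, 2),
   ("n", -1, 3),
   ("o", 0, 4)]

def convertTextToFeatures_alt (text : String) : List (List (String × String)) :=
  let padded := List.replicate 4 "<B>" ++ text.toList.map (fun c => String.ofList [c])
      ++ List.replicate 4 "<E>"
  (PySem.List.pyRange 0 (text.toList.length : Int) 1).foldl (fun rows i =>
    rows ++ [pvWindows.map (fun w =>
      (w.1, PySem.Str.join "" (PySem.List.slice padded (some (i + 4 + w.2.1)) (some (i + 4 + w.2.2 + 1)))))]) []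

-- ===== PRECONDITION & SPEC =====
def Spec_convertTextToFeatures (text : String) (out : List (List (String × String))) : Prop := out = convertTextToFeatures_alt text
instance (text : String) (out : List (List (String × String))) : Decidable (Spec_convertTextToFeatures text out) := by unfold Spec_convertTextToFeatures; infer_instance

-- ===== CLAIM (what is proved, stated in full; the proofs are below) =====
def Claim_equal_convertTextToFeatures : Prop := ∀ (text : String), Dom_convertTextToFeatures text → Spec_convertTextToFeatures text (convertTextToFeatures text)

-- ===== LEMMAS AND PROOFS =====

-- the window [i, i+L) of an f/e-padded list equals the same window of the 4/4-padded list
lemma pvCore (arr : List String) (i f e L : Nat) (hf : f ≤ 4) (he : e ≤ 4) (hL1 : 1 ≤ L)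
    (hL : i + L ≤ f + arr.length + e) :
    ((List.replicate f "<B>" ++ arr ++ List.replicate e "<E>").drop i).take L
      = ((List.replicate 4 "<B>" ++ arr ++ List.replicate 4 "<E>").drop ((4 - f) + i)).take L := by
  have h4 : (List.replicate 4 "<B>" : List String) = List.replicate (4 - f) "<B>" ++ List.replicate f "<B>" := by
    rw [← List.replicate_add]; congr 1; omega
  have hE : (List.replicate 4 "<E>" : List String) = List.replicate e "<E>" ++ List.replicate (4 - e) "<E>" := by
    rw [← List.replicate_add]; congr 1; omega
  have hassoc : (List.replicate (4 - f) "<B>" ++ List.replicate f "<B>") ++ arr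
      ++ (List.replicate e "<E>" ++ List.replicate (4 - e) "<E>")
      = List.replicate (4 - f) "<B>"
        ++ ((List.replicate f "<B>" ++ arr ++ List.replicate e "<E>") ++ List.replicate (4 - e) "<E>") := by
    simp only [List.append_assoc]
  have hsplit : i ≤ (List.replicate f "<B>" ++ arr ++ List.replicate e "<E>").length := by
    simp; omega
  have htake : L ≤ ((List.replicate f "<B>" ++ arr ++ List.replicate e "<E>").drop i).length := by
    simp; omega
  conv_rhs =>
    rw [h4, hE, hassoc,
        show (4 - f) + i = (List.replicate (4 - f) "<B>" : List String).length + i by simp,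
        ← List.drop_drop, List.drop_left,
        List.drop_append_of_le_length hsplit,
        List.take_append_of_le_length htake]

-- one window at one position: A's slice of its own padding = B's slice of the 4/4 padding
lemma pvWinEq (arr : List String) (k : Nat) (hk : k < arr.length) (a b : Int)
    (ha : -4 ≤ a) (hab : a ≤ b) (hb : b ≤ 4) :
    PySem.List.slice
        (List.replicate (max 0 (-1 * a)).toNat "<B>" ++ arr ++ List.replicate (max b 0).toNat "<E>")
        (some (if a > 0 then (k : Int) + a else (k : Int)))
        (some ((if a > 0 then (k : Int) + a else (k : Int)) + (b - a) + 1))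
      = PySem.List.slice (List.replicate 4 "<B>" ++ arr ++ List.replicate 4 "<E>")
        (some ((k : Int) + 4 + a)) (some ((k : Int) + 4 + b + 1)) := by
  have hs1 : (0:Int) ≤ (if a > 0 then (k : Int) + a else (k : Int)) := by split_ifs <;> omega
  have hs2 : (0:Int) ≤ (if a > 0 then (k : Int) + a else (k : Int)) + (b - a) + 1 := by
    split_ifs <;> omega
  rw [PySem.List.slice_toNat _ hs1 hs2, PySem.List.slice_toNat _ (by omega) (by omega)]
  have hcnt1 : ((if a > 0 then (k : Int) + a else (k : Int)) + (b - a) + 1).toNat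
      - (if a > 0 then (k : Int) + a else (k : Int)).toNat = (b - a + 1).toNat := by
    split_ifs <;> omega
  have hcnt2 : ((k : Int) + 4 + b + 1).toNat - ((k : Int) + 4 + a).toNat = (b - a + 1).toNat := by
    omega
  rw [hcnt1, hcnt2]
  have hidx : ((k : Int) + 4 + a).toNat
      = (4 - (max 0 (-1 * a)).toNat) + (if a > 0 then (k : Int) + a else (k : Int)).toNat := by
    split_ifs <;> omega
  rw [hidx]
  exact pvCore arr _ _ _ _ (by omega) (by omega) (by omega) (by split_ifs <;> omega)

-- A's column for window (a,b) as a map over the positions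
lemma getNgram_letter (arr : List String) (a b : Int) :
    getNgram arr (a, b) "letter"
      = (List.range arr.length).map (fun (k : Nat) =>
          PySem.Str.join "" (PySem.List.slice
            (List.replicate (max 0 (-1 * a)).toNat "<B>" ++ arr ++ List.replicate (max b 0).toNat "<E>")
            (some (if a > 0 then (k : Int) + a else (k : Int)))
            (some ((if a > 0 then (k : Int) + a else (k : Int)) + (b - a) + 1)))) := by
  unfold getNgram
  rw [PySem.List.pyRange_one]
  simp only [beq_self_eq_true, if_true, PySem.List.foldl_append_singleton_eq_map,
    List.nil_append, List.map_map, Int.sub_zero, Int.toNat_natCast, Int.zero_add]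
  rfl

lemma pvLenSub0 (n : Nat) : (((n : Nat) : Int) - 0).toNat = n := by omega

-- the 23-way zip of 23 maps over the same index list is one map building the row directly
lemma pvZip23_map {α : Type} (R : List α) (f1 f2 f3 f4 f5 f6 f7 f8 f9 f10 f11 f12 f13 f14 f15 f16 f17 f18 f19 f20 f21 f22 f23 : α → String) :
    pvZip23 (R.map f1) (R.map f2) (R.map f3) (R.map f4) (R.map f5) (R.map f6) (R.map f7) (R.map f8) (R.map f9) (R.map f10) (R.map f11) (R.map f12) (R.map f13) (R.map f14) (R.map f15) (R.map f16) (R.map f17) (R.map f18) (R.map f19) (R.map f20) (R.map f21) (R.map f22) (R.map f23)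
      = R.map (fun k => [("a", f1 k), ("a_2", f2 k), ("a_3", f3 k), ("a_4", f4 k), ("a_5", f5 k), ("a_6", f6 k), ("a_7", f7 k), ("a_8", f8 k), ("a_9", f9 k), ("b", f10 k), ("c", f11 k), ("d", f12 k), ("e", f13 k), ("f", f14 k), ("g", f15 k), ("h", f16 k), ("i", f17 k), ("j", f18 k), ("k", f19 k), ("l", f20 k), ("m", f21 k), ("n", f22 k), ("o", f23 k)]) := by
  induction R with
  | nil => simp [pvZip23]
  | cons x R ih => simp [pvZip23, ih]

-- ===== VERDICT (by name: the statement is the Claim_ definition above) =====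
theorem convertTextToFeatures_spec : Claim_equal_convertTextToFeatures := by
  intro text _
  unfold Spec_convertTextToFeatures convertTextToFeatures convertTextToFeatures_alt
  simp only [getNgram_letter, pvZip23_map, PySem.List.pyRange_one,
    PySem.List.foldl_append_singleton_eq_map, List.nil_append, List.map_map, List.length_map,
    pvLenSub0, Int.zero_add]
  apply List.map_congr_left
  intro k hk
  simp only [List.mem_range] at hk
  have hk' : k < (text.toList.map (fun c => String.ofList [c])).length := by simpa using hk
  simp only [Function.comp, pvWindows, List.map_cons, List.map_nil]
  rw [pvWinEq _ k hk' (-4) (-4) (by norm_num) (by norm_num) (by norm_num),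
      pvWinEq _ k hk' (-3) (-3) (by norm_num) (by norm_num) (by norm_num),
      pvWinEq _ k hk' (-2) (-2) (by norm_num) (by norm_num) (by norm_num),
      pvWinEq _ k hk' (-1) (-1) (by norm_num) (by norm_num) (by norm_num),
      pvWinEq _ k hk' (0) (0) (by norm_num) (by norm_num) (by norm_num),
      pvWinEq _ k hk' (1) (1) (by norm_num) (by norm_num) (by norm_num),
      pvWinEq _ k hk' (2) (2) (by norm_num) (by norm_num) (by norm_num),
      pvWinEq _ k hk' (3) (3) (by norm_num) (by norm_num) (by norm_num),
      pvWinEq _ k hk' (4) (4) (by norm_num) (by norm_num) (by norm_num),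
      pvWinEq _ k hk' (-1) (0) (by norm_num) (by norm_num) (by norm_num),
      pvWinEq _ k hk' (0) (1) (by norm_num) (by norm_num) (by norm_num),
      pvWinEq _ k hk' (-2) (0) (by norm_num) (by norm_num) (by norm_num),
      pvWinEq _ k hk' (-1) (1) (by norm_num) (by norm_num) (by norm_num),
      pvWinEq _ k hk' (0) (2) (by norm_num) (by norm_num) (by norm_num),
      pvWinEq _ k hk' (-3) (0) (by norm_num) (by norm_num) (by norm_num),
      pvWinEq _ k hk' (-2) (1) (by norm_num) (by norm_num) (by norm_num),
      pvWinEq _ k hk' (-1) (2) (by norm_num) (by norm_num) (by norm_num),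
      pvWinEq _ k hk' (0) (3) (by norm_num) (by norm_num) (by norm_num),
      pvWinEq _ k hk' (-4) (0) (by norm_num) (by norm_num) (by norm_num),
      pvWinEq _ k hk' (-3) (1) (by norm_num) (by norm_num) (by norm_num),
      pvWinEq _ k hk' (-2) (2) (by norm_num) (by norm_num) (by norm_num),
      pvWinEq _ k hk' (-1) (3) (by norm_num) (by norm_num) (by norm_num),
      pvWinEq _ k hk' (0) (4) (by norm_num) (by norm_num) (by norm_num)]
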